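-- pv_equiv track=rewrite | github.com/larynx95/rosalind | src/ba06/ba06i_graph_to_genome/ba06i_01.py | colored_to_cycles
-- ===== SOURCE A (Python) =====
-- def colored_to_cycles(colored_edges):
--     """
--     [(int,int)] -> [[int]]
--     returns a list of integer lists (lists of nodes, cycles)
--     >>> colored_to_cycles([(2,4),(3,6),(5,1),(7,9),(10,12),(11,8)])
--         [[1,2,4,3,6,5],[8,7,9,10,12,11]]
--     """
--     colored_edges = sorted(colored_edges)  # <-- Is this right?
--     cycles = []
--     temp = []
--     for edge in colored_edges:
--         temp.append(edge[0])
--         if edge[0] > edge[1]: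
--             temp = [edge[1]] + temp
--             cycles.append(temp)
--             temp = []
--         else:
--             temp.append(edge[1])
--     return cycles
-- ===== SOURCE B (Python) =====
-- def colored_to_cycles(colored_edges):
--     # Different decomposition: first group the sorted edges into closed cycles
--     # (cut after each edge with edge[0] > edge[1]; an unterminated trailing
--     # group is discarded), then turn each group into a node list by flattening
--     # and rotating the last node to the front.
--     groups, cur = [], []
--     for e in sorted(colored_edges):
--         cur.append(e)
--         if e[0] > e[1]:
--             groups.append(cur)
--             cur = []
--     cycles = []
--     for g in groups:
--         nodes = [x for e in g for x in e]
--         cycles.append(nodes[-1:] + nodes[:-1])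
--     return cycles
-- ===== Notes on version B (the rewrite author's own statement) =====
-- stated objective: alternative
-- what changed: B splits the sorted edge list into closed groups first and then builds each cycle by flattening a group and rotating its last node to the front, instead of A's single loop that interleaves node accumulation with prepend-on-close.
import Mathlib
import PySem

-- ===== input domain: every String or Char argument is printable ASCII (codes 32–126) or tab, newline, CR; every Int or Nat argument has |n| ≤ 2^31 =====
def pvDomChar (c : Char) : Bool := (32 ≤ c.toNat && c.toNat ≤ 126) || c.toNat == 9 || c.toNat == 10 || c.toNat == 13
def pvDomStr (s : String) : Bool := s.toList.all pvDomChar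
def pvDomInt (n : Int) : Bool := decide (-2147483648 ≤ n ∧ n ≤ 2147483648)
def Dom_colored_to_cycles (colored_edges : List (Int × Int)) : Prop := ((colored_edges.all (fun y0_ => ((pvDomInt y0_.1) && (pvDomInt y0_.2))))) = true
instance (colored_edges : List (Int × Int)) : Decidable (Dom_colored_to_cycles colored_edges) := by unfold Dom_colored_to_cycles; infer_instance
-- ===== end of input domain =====

-- B groups the sorted edges into closed cycles first, then flattens and rotates each group; alternative decomposition of A's single interleaved loop.


-- ===== PORT A =====
def colored_to_cycles (colored_edges : List (Int × Int)) : List (List Int) :=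
  let es := PySem.List.sorted2 colored_edges Prod.fst Prod.snd
  (es.foldl (fun (st : List (List Int) × List Int) edge =>
      let temp := st.2 ++ [edge.1]
      if edge.1 > edge.2 then (st.1 ++ [edge.2 :: temp], [])
      else (st.1, temp ++ [edge.2])) ([], [])).1

-- ===== PORT B =====
-- cycle of one closed group: flatten, then nodes[-1:] ++ nodes[:-1]
def pvCycleOf (g : List (Int × Int)) : List Int :=
  let nodes := g.flatMap (fun e => [e.1, e.2])
  PySem.List.slice nodes (some (-1)) none ++ PySem.List.slice nodes none (some (-1))

def colored_to_cycles_alt (colored_edges : List (Int × Int)) : List (List Int) :=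
  let st := (PySem.List.sorted2 colored_edges Prod.fst Prod.snd).foldl
      (fun (st : List (List (Int × Int)) × List (Int × Int)) e =>
        let cur := st.2 ++ [e]
        if e.1 > e.2 then (st.1 ++ [cur], ([] : List (Int × Int))) else (st.1, cur)) ([], [])
  st.1.map pvCycleOf

-- ===== PRECONDITION & SPEC =====
def Spec_colored_to_cycles (colored_edges : List (Int × Int)) (out : List (List Int)) : Prop := out = colored_to_cycles_alt colored_edges
instance (colored_edges : List (Int × Int)) (out : List (List Int)) : Decidable (Spec_colored_to_cycles colored_edges out) := by unfold Spec_colored_to_cycles; infer_instance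

-- ===== CLAIM (what is proved, stated in full; the proofs are below) =====
def Claim_equal_colored_to_cycles : Prop := ∀ (colored_edges : List (Int × Int)), Dom_colored_to_cycles colored_edges → Spec_colored_to_cycles colored_edges (colored_to_cycles colored_edges)

-- ===== LEMMAS AND PROOFS =====

lemma pvCycleOf_append (cur : List (Int × Int)) (e : Int × Int) :
    pvCycleOf (cur ++ [e]) =
      e.2 :: (cur.flatMap (fun x => [x.1, x.2]) ++ [e.1]) := by
  have h : (cur ++ [e]).flatMap (fun x => ([x.1, x.2] : List Int))
      = (cur.flatMap (fun x => [x.1, x.2]) ++ [e.1]) ++ [e.2] := by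
    simp
  simp only [pvCycleOf, h, PySem.List.slice_from_neg_one, PySem.List.slice_to_neg_one]
  simp
  have hlen : ((cur.flatMap (fun x => ([x.1, x.2] : List Int))) ++ [e.1]).length
      = cur.length * 2 + 1 := by simp
  rw [show (cur.flatMap (fun x => ([x.1, x.2] : List Int)) ++ [e.1, e.2])
      = (cur.flatMap (fun x => [x.1, x.2]) ++ [e.1]) ++ [e.2] by simp,
    List.drop_left' hlen]
  simp

lemma pv_fold_eq (es : List (Int × Int)) :
    ∀ (cyc : List (List Int)) (grp : List (List (Int × Int))) (cur : List (Int × Int)),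
    cyc = grp.map pvCycleOf →
    (es.foldl (fun (st : List (List Int) × List Int) edge =>
        let temp := st.2 ++ [edge.1]
        if edge.1 > edge.2 then (st.1 ++ [edge.2 :: temp], [])
        else (st.1, temp ++ [edge.2])) (cyc, cur.flatMap (fun x => [x.1, x.2]))).1
      = ((es.foldl (fun (st : List (List (Int × Int)) × List (Int × Int)) e =>
          let cur := st.2 ++ [e]
          if e.1 > e.2 then (st.1 ++ [cur], ([] : List (Int × Int))) else (st.1, cur))
          (grp, cur)).1).map pvCycleOf := by
  induction es with
  | nil => intro cyc grp cur h; simpa using h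
  | cons e es ih =>
    intro cyc grp cur h
    simp only [List.foldl_cons]
    by_cases hgt : e.1 > e.2
    · simp only [hgt, if_pos]
      have h2 : cyc ++ [e.2 :: (cur.flatMap (fun x => [x.1, x.2]) ++ [e.1])]
          = (grp ++ [cur ++ [e]]).map pvCycleOf := by
        rw [h, List.map_append, List.map_singleton, pvCycleOf_append]
      have := ih (cyc ++ [e.2 :: (cur.flatMap (fun x => [x.1, x.2]) ++ [e.1])])
        (grp ++ [cur ++ [e]]) [] h2
      simpa using this
    · simp only [hgt, if_false]
      have := ih cyc grp (cur ++ [e]) h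
      simp only [List.flatMap_append, List.flatMap_singleton] at this
      simpa [List.append_assoc] using this

-- ===== VERDICT (by name: the statement is the Claim_ definition above) =====
theorem colored_to_cycles_spec : Claim_equal_colored_to_cycles := by
  intro colored_edges _
  unfold Spec_colored_to_cycles colored_to_cycles colored_to_cycles_alt
  simpa using pv_fold_eq (PySem.List.sorted2 colored_edges Prod.fst Prod.snd) [] [] [] rfl
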